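-- pv_equiv track=rewrite | github.com/LennartElbe/codeEvo | raw_scripts/132.230.102.123-10.21.12.4/1569576903.py | word_count_iter_oracle
-- ===== SOURCE A (Python) =====
-- def word_count_iter_oracle(iter):
--     lines = 0
--     words = 0
--     chars = 0
--     for line in iter:
--         lines += 1
--         chars += len(line)
--         r = line.split()
--         words += len(r)
--     return (lines, words, chars)
-- ===== SOURCE B (Python) =====
-- def word_count_iter_oracle(iter):
--     data = list(iter)
--     lines = len(data)
--     words = sum(len(line.split()) for line in data)
--     chars = sum(len(line) for line in data)
--     return (lines, words, chars)
-- ===== Notes on version B (the rewrite author's own statement) =====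
-- stated objective: simpler
-- what changed: A's single fused loop maintaining three running counters is replaced by materializing the iterable once and computing each total independently (len plus two separate sum-reductions).
import Mathlib
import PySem

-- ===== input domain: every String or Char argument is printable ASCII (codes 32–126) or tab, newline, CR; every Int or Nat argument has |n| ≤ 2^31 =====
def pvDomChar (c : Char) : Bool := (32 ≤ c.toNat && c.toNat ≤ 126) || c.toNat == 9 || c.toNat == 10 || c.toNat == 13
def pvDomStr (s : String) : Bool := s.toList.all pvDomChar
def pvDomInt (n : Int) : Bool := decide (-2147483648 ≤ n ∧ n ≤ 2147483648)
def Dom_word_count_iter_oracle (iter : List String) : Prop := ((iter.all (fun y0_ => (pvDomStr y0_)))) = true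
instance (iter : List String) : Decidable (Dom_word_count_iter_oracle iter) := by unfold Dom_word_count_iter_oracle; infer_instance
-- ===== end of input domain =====

-- ===== PORT A =====
def word_count_iter_oracle (iter : List String) : Int × Int × Int :=
  -- lines = 0; words = 0; chars = 0; for line in iter: ...
  iter.foldl
    (fun (s : Int × Int × Int) line =>
      (s.1 + 1, s.2.1 + (PySem.Str.split₀ line).length, s.2.2 + PySem.Str.len line))
    (0, 0, 0)

-- ===== PORT B =====
-- B: materialize once, then three independent reductions
def word_count_iter_oracle_alt (iter : List String) : Int × Int × Int :=
  let data := iter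
  ((data.length : Int),
   data.foldl (fun acc line => acc + ((PySem.Str.split₀ line).length : Int)) 0,
   data.foldl (fun acc line => acc + PySem.Str.len line) 0)

-- ===== PRECONDITION & SPEC =====
def Spec_word_count_iter_oracle (iter : List String) (out : Int × Int × Int) : Prop := out = word_count_iter_oracle_alt iter
instance (iter : List String) (out : Int × Int × Int) : Decidable (Spec_word_count_iter_oracle iter out) := by unfold Spec_word_count_iter_oracle; infer_instance

-- ===== CLAIM (what is proved, stated in full; the proofs are below) =====
def Claim_equal_word_count_iter_oracle : Prop := ∀ (iter : List String), Dom_word_count_iter_oracle iter → Spec_word_count_iter_oracle iter (word_count_iter_oracle iter)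

-- ===== LEMMAS AND PROOFS =====

-- ===== VERDICT (by name: the statement is the Claim_ definition above) =====
theorem wc_fold_eq (iter : List String) (a b c : Int) :
    iter.foldl
      (fun (s : Int × Int × Int) line =>
        (s.1 + 1, s.2.1 + (PySem.Str.split₀ line).length, s.2.2 + PySem.Str.len line))
      (a, b, c)
    = (a + iter.length,
       iter.foldl (fun acc line => acc + ((PySem.Str.split₀ line).length : Int)) b,
       iter.foldl (fun acc line => acc + PySem.Str.len line) c) := by
  induction iter generalizing a b c with
  | nil => simp
  | cons x xs ih =>
      simp only [List.foldl_cons, List.length_cons, ih]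
      congr 1
      push_cast; ring

theorem word_count_iter_oracle_spec : Claim_equal_word_count_iter_oracle := by
  intro iter _
  unfold Spec_word_count_iter_oracle word_count_iter_oracle word_count_iter_oracle_alt
  rw [wc_fold_eq]
  simp
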